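-- pv_equiv track=rewrite | github.com/Minorli/ob_comparator | run_fixup.py | is_comment_only_statement
-- ===== SOURCE A (Python) =====
-- def is_comment_only_statement(statement: str) -> bool:
--     if not statement.strip():
--         return True
--     in_single = False
--     in_double = False
--     block_comment_depth = 0
--     idx = 0
--     length = len(statement)
--     has_code = False
--
--     while idx < length:
--         ch = statement[idx]
--         nxt = statement[idx + 1] if idx + 1 < length else ""
--
--         if block_comment_depth > 0:
--             if ch == "/" and nxt == "*":
--                 block_comment_depth += 1
--                 idx += 2
--                 continue
--             if ch == "*" and nxt == "/":
--                 block_comment_depth -= 1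
--                 idx += 2
--                 continue
--             idx += 1
--             continue
--
--         if not in_single and not in_double:
--             if ch == "/" and nxt == "*":
--                 block_comment_depth = 1
--                 idx += 2
--                 continue
--             if ch == "-" and nxt == "-":
--                 while idx < length and statement[idx] != "\n":
--                     idx += 1
--                 continue
--
--         if ch == "'" and not in_double:
--             if in_single and nxt == "'":
--                 has_code = True
--                 idx += 2
--                 continue
--             in_single = not in_single
--             has_code = True
--             idx += 1
--             continue
--
--         if ch == '"' and not in_single:
--             if in_double and nxt == '"':
--                 has_code = True
--                 idx += 2
--                 continue
--             in_double = not in_double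
--             has_code = True
--             idx += 1
--             continue
--
--         if not ch.isspace():
--             has_code = True
--         idx += 1
--
--     return not has_code
-- ===== SOURCE B (Python) =====
-- def is_comment_only_statement(statement: str) -> bool:
--     n = len(statement)
--
--     def skip_block(i):
--         # i is just past an opening '/*'; return the index just past the
--         # matching '*/' (handling nesting by recursion), or n if unterminated.
--         while i < n:
--             if statement.startswith('/*', i):
--                 i = skip_block(i + 2)
--             elif statement.startswith('*/', i):
--                 return i + 2
--             else:
--                 i += 1
--         return n
--
--     i = 0
--     while i < n:
--         if statement.startswith('/*', i):
--             i = skip_block(i + 2)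
--         elif statement.startswith('--', i):
--             j = statement.find('\n', i)
--             i = n if j == -1 else j
--         elif not statement[i].isspace():
--             return False
--         else:
--             i += 1
--     return True
-- ===== Notes on version B (the rewrite author's own statement) =====
-- stated objective: faster
-- what changed: Replaced A's single flat automaton (in_single/in_double quote flags plus a block-comment depth counter, which always scans to the end of the string) by a recursive-descent scanner: a recursive skip_block helper consumes nested block comments, line comments are skipped via str.find, quote-state tracking is dropped entirely, and the function returns False immediately at the first code character instead of scanning the rest of the string.
import Mathlib
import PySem

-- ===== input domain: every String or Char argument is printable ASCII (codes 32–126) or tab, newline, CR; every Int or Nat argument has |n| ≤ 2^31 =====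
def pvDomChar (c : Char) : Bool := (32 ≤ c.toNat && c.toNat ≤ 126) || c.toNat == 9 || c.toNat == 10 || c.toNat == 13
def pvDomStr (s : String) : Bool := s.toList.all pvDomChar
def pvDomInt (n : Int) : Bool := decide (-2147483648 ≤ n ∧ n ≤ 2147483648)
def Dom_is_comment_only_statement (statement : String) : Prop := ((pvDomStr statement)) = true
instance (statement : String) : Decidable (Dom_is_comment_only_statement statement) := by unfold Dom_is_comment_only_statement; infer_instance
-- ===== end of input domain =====

-- B replaces A's flat automaton (quote flags + block-comment depth counter, always
-- scanning to the end) by a recursive-descent scanner with early return at the first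
-- code character; B also returns at the first code character where A scans on (a timing run measured B faster on random inputs).

-- used by the ports' termination proofs
lemma pv_tail_le (l : List Char) : l.tail.length ≤ l.length := by
  simp [List.length_tail]

-- ===== PORT A =====
-- A's while loop; the remaining character list stands for the index idx,
-- rest.head? is Python's nxt ('' at the end = none here).
def pvA_loop (cs : List Char) (in_single in_double : Bool) (depth : Nat) (has_code : Bool) : Bool :=
  match cs with
  | [] => !has_code
  | ch :: rest =>
    if depth > 0 then
      if ch = '/' ∧ rest.head? = some '*' then
        pvA_loop rest.tail in_single in_double (depth + 1) has_code
      else if ch = '*' ∧ rest.head? = some '/' then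
        pvA_loop rest.tail in_single in_double (depth - 1) has_code
      else
        pvA_loop rest in_single in_double depth has_code
    else if in_single = false ∧ in_double = false ∧ ch = '/' ∧ rest.head? = some '*' then
      pvA_loop rest.tail in_single in_double 1 has_code
    else if in_single = false ∧ in_double = false ∧ ch = '-' ∧ rest.head? = some '-' then
      -- inner 'while idx < length and statement[idx] != "\n"': here ch = '-' ≠ '\n'
      -- is dropped first, then the scan continues through rest
      pvA_loop (rest.dropWhile (fun c => c ≠ '\n')) in_single in_double depth has_code
    else if ch = '\'' ∧ in_double = false then
      if in_single = true ∧ rest.head? = some '\'' then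
        pvA_loop rest.tail in_single in_double depth true
      else
        pvA_loop rest (!in_single) in_double depth true
    else if ch = '"' ∧ in_single = false then
      if in_double = true ∧ rest.head? = some '"' then
        pvA_loop rest.tail in_single in_double depth true
      else
        pvA_loop rest in_single (!in_double) depth true
    else if PySem.Chars.isspace ch = false then
      pvA_loop rest in_single in_double depth true
    else
      pvA_loop rest in_single in_double depth has_code
termination_by cs.length
decreasing_by
  all_goals simp only [List.length_cons]
  all_goals first
    | exact Nat.lt_succ_of_le (pv_tail_le rest)
    | exact Nat.lt_succ_of_le (List.length_dropWhile_le _ _)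
    | exact Nat.lt_succ_self _

def is_comment_only_statement (statement : String) : Bool :=
  if PySem.Str.strip statement = "" then true
  else pvA_loop statement.toList false false 0 false

-- ===== PORT B =====
-- Source B's skip_block: the list suffix plays the role of the index i; the returned
-- value carries its length bound (needed for the nested recursive call to terminate).
def pvB_skip (cs : List Char) : {l : List Char // l.length ≤ cs.length} :=
  match cs with
  | [] => ⟨[], Nat.le_refl _⟩
  | ch :: rest =>
    if ch = '/' ∧ rest.head? = some '*' then
      match pvB_skip rest.tail with
      | ⟨l1, hl1⟩ =>
        ⟨(pvB_skip l1).1, by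
          have h2 := (pvB_skip l1).2
          have h3 := pv_tail_le rest
          simp only [List.length_cons]
          omega⟩
    else if ch = '*' ∧ rest.head? = some '/' then
      ⟨rest.tail, by
        have := pv_tail_le rest
        simp only [List.length_cons]
        omega⟩
    else
      ⟨(pvB_skip rest).1, by
        have := (pvB_skip rest).2
        simp only [List.length_cons]
        omega⟩
termination_by cs.length
decreasing_by
  · simp only [List.length_cons]
    exact Nat.lt_succ_of_le (pv_tail_le rest)
  · have h3 := pv_tail_le rest
    simp only [List.length_cons]
    omega
  · simp only [List.length_cons]
    exact Nat.lt_succ_self _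

-- Source B's main while loop; 'statement.find("\n", i)' becomes dropWhile on the
-- remaining characters (ch = '-' ≠ '\n' is dropped first).
def pvB_main (cs : List Char) : Bool :=
  match cs with
  | [] => true
  | ch :: rest =>
    if ch = '/' ∧ rest.head? = some '*' then
      pvB_main (pvB_skip rest.tail).1
    else if ch = '-' ∧ rest.head? = some '-' then
      pvB_main (rest.dropWhile (fun c => c ≠ '\n'))
    else if PySem.Chars.isspace ch = false then
      false
    else
      pvB_main rest
termination_by cs.length
decreasing_by
  · have h1 := (pvB_skip rest.tail).2
    have h2 := pv_tail_le rest
    simp only [List.length_cons]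
    omega
  · simp only [List.length_cons]
    exact Nat.lt_succ_of_le (List.length_dropWhile_le _ _)
  · simp only [List.length_cons]
    exact Nat.lt_succ_self _

def is_comment_only_statement_alt (statement : String) : Bool :=
  pvB_main statement.toList

-- ===== PRECONDITION & SPEC =====
def Spec_is_comment_only_statement (statement : String) (out : Bool) : Prop := out = is_comment_only_statement_alt statement
instance (statement : String) (out : Bool) : Decidable (Spec_is_comment_only_statement statement out) := by unfold Spec_is_comment_only_statement; infer_instance

-- ===== CLAIM (what is proved, stated in full; the proofs are below) =====
def Claim_equal_is_comment_only_statement : Prop := ∀ (statement : String), Dom_is_comment_only_statement statement → Spec_is_comment_only_statement statement (is_comment_only_statement statement)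

-- ===== LEMMAS AND PROOFS =====

-- branch equations for pvB_skip's value component
lemma pvB_skip_nil : (pvB_skip []).1 = [] := by rw [pvB_skip]

lemma pvB_skip_open (ch : Char) (rest : List Char) (h : ch = '/' ∧ rest.head? = some '*') :
    (pvB_skip (ch :: rest)).1 = (pvB_skip (pvB_skip rest.tail).1).1 := by
  rw [pvB_skip, if_pos h]

lemma pvB_skip_close (ch : Char) (rest : List Char) (h1 : ¬(ch = '/' ∧ rest.head? = some '*'))
    (h2 : ch = '*' ∧ rest.head? = some '/') :
    (pvB_skip (ch :: rest)).1 = rest.tail := by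
  rw [pvB_skip, if_neg h1, if_pos h2]

lemma pvB_skip_step (ch : Char) (rest : List Char) (h1 : ¬(ch = '/' ∧ rest.head? = some '*'))
    (h2 : ¬(ch = '*' ∧ rest.head? = some '/')) :
    (pvB_skip (ch :: rest)).1 = (pvB_skip rest).1 := by
  rw [pvB_skip, if_neg h1, if_neg h2]

-- once has_code is true, A's loop returns false
lemma pvA_loop_true (n : Nat) : ∀ cs : List Char, cs.length ≤ n →
    ∀ s d dep, pvA_loop cs s d dep true = false := by
  induction n with
  | zero =>
    intro cs h s d dep
    match cs with
    | [] => simp [pvA_loop]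
    | c :: r => simp at h
  | succ n ih =>
    intro cs h s d dep
    match cs with
    | [] => simp [pvA_loop]
    | ch :: rest =>
      simp only [List.length_cons] at h
      rw [pvA_loop]
      have hr : rest.length ≤ n := by omega
      have ht : rest.tail.length ≤ n := le_trans (pv_tail_le rest) hr
      have hd : (rest.dropWhile (fun c => c ≠ '\n')).length ≤ n :=
        le_trans (List.length_dropWhile_le _ _) hr
      split_ifs <;> first
        | exact ih _ ht _ _ _
        | exact ih _ hd _ _ _
        | exact ih _ hr _ _ _

-- inside a block comment, A's scan through the matching '*/' is B's skip_block
lemma pvA_skip (n : Nat) : ∀ cs : List Char, cs.length ≤ n →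
    ∀ s d dep hc, pvA_loop cs s d (dep + 1) hc = pvA_loop (pvB_skip cs).1 s d dep hc := by
  induction n with
  | zero =>
    intro cs h s d dep hc
    match cs with
    | [] => rw [pvB_skip_nil]; rw [pvA_loop, pvA_loop]
    | c :: r => simp at h
  | succ n ih =>
    intro cs h s d dep hc
    match cs with
    | [] => rw [pvB_skip_nil]; rw [pvA_loop, pvA_loop]
    | ch :: rest =>
      simp only [List.length_cons] at h
      have hr : rest.length ≤ n := by omega
      have ht : rest.tail.length ≤ n := le_trans (pv_tail_le rest) hr
      rw [pvA_loop, if_pos (Nat.succ_pos dep)]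
      by_cases h1 : ch = '/' ∧ rest.head? = some '*'
      · rw [if_pos h1, pvB_skip_open ch rest h1]
        have e1 := ih rest.tail ht s d (dep + 1) hc
        rw [e1]
        exact ih (pvB_skip rest.tail).1 (le_trans (pvB_skip rest.tail).2 ht) s d dep hc
      · by_cases h2 : ch = '*' ∧ rest.head? = some '/'
        · rw [if_neg h1, if_pos h2, pvB_skip_close ch rest h1 h2]
          rw [Nat.add_sub_cancel]
        · rw [if_neg h1, if_neg h2, pvB_skip_step ch rest h1 h2]
          exact ih rest hr s d dep hc

-- main loop agreement from the all-clean start state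
lemma pvMain_eq (n : Nat) : ∀ cs : List Char, cs.length ≤ n →
    pvB_main cs = pvA_loop cs false false 0 false := by
  induction n with
  | zero =>
    intro cs h
    match cs with
    | [] => rw [pvA_loop, pvB_main]; rfl
    | c :: r => simp at h
  | succ n ih =>
    intro cs h
    match cs with
    | [] => rw [pvA_loop, pvB_main]; rfl
    | ch :: rest =>
      simp only [List.length_cons] at h
      have hr : rest.length ≤ n := by omega
      have ht : rest.tail.length ≤ n := le_trans (pv_tail_le rest) hr
      have hd : (rest.dropWhile (fun c => c ≠ '\n')).length ≤ n :=
        le_trans (List.length_dropWhile_le _ _) hr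
      rw [pvA_loop, pvB_main, if_neg (lt_irrefl 0)]
      by_cases h1 : ch = '/' ∧ rest.head? = some '*'
      · rw [if_pos h1, if_pos (show false = false ∧ false = false ∧ ch = '/' ∧ rest.head? = some '*' from ⟨rfl, rfl, h1.1, h1.2⟩)]
        have e := pvA_skip rest.tail.length rest.tail le_rfl false false 0 false
        rw [Nat.zero_add] at e
        rw [e]
        exact ih _ (le_trans (pvB_skip rest.tail).2 ht)
      · have ha1 : ¬(false = false ∧ false = false ∧ ch = '/' ∧ rest.head? = some '*') := by
          rintro ⟨-, -, hx, hy⟩; exact h1 ⟨hx, hy⟩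
        by_cases h2 : ch = '-' ∧ rest.head? = some '-'
        · rw [if_neg h1, if_pos h2, if_neg ha1,
            if_pos (show false = false ∧ false = false ∧ ch = '-' ∧ rest.head? = some '-' from ⟨rfl, rfl, h2.1, h2.2⟩)]
          exact ih _ hd
        · have ha2 : ¬(false = false ∧ false = false ∧ ch = '-' ∧ rest.head? = some '-') := by
            rintro ⟨-, -, hx, hy⟩; exact h2 ⟨hx, hy⟩
          by_cases h3 : PySem.Chars.isspace ch = false
          · -- first code character: B returns false, A sets has_code and scans on
            rw [if_neg h1, if_neg h2, if_pos h3, if_neg ha1, if_neg ha2]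
            by_cases h4 : ch = '\''
            · rw [if_pos (show ch = '\'' ∧ false = false from ⟨h4, rfl⟩),
                if_neg (show ¬(false = true ∧ rest.head? = some '\'') from by simp)]
              exact (pvA_loop_true rest.length rest le_rfl _ _ _).symm
            · rw [if_neg (show ¬(ch = '\'' ∧ false = false) from fun hx => h4 hx.1)]
              by_cases h5 : ch = '"'
              · rw [if_pos (show ch = '"' ∧ false = false from ⟨h5, rfl⟩),
                  if_neg (show ¬(false = true ∧ rest.head? = some '"') from by simp)]
                exact (pvA_loop_true rest.length rest le_rfl _ _ _).symm
              · rw [if_neg (show ¬(ch = '"' ∧ false = false) from fun hx => h5 hx.1), if_pos h3]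
                exact (pvA_loop_true rest.length rest le_rfl _ _ _).symm
          · -- whitespace: both sides step one character
            have hsp : PySem.Chars.isspace ch = true := by
              cases hc : PySem.Chars.isspace ch
              · exact absurd hc h3
              · rfl
            have h4 : ¬(ch = '\'' ∧ false = false) := by
              rintro ⟨rfl, -⟩; exact absurd hsp (by decide)
            have h5 : ¬(ch = '"' ∧ false = false) := by
              rintro ⟨rfl, -⟩; exact absurd hsp (by decide)
            rw [if_neg h1, if_neg h2, if_neg h3, if_neg ha1, if_neg ha2, if_neg h4, if_neg h5,
              if_neg h3]
            exact ih _ hr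

-- whitespace-only input (A's early 'not statement.strip()' guard): B also returns true
lemma pvB_main_all_space (n : Nat) : ∀ cs : List Char, cs.length ≤ n →
    (∀ c ∈ cs, PySem.Chars.isspace c = true) → pvB_main cs = true := by
  induction n with
  | zero =>
    intro cs h hall
    match cs with
    | [] => rw [pvB_main]
    | c :: r => simp at h
  | succ n ih =>
    intro cs h hall
    match cs with
    | [] => rw [pvB_main]
    | ch :: rest =>
      simp only [List.length_cons] at h
      have hsp := hall ch (List.mem_cons_self ..)
      rw [pvB_main]
      have h1 : ¬(ch = '/' ∧ rest.head? = some '*') := by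
        rintro ⟨rfl, -⟩; exact absurd hsp (by decide)
      have h2 : ¬(ch = '-' ∧ rest.head? = some '-') := by
        rintro ⟨rfl, -⟩; exact absurd hsp (by decide)
      have h3 : ¬(PySem.Chars.isspace ch = false) := by simp [hsp]
      rw [if_neg h1, if_neg h2, if_neg h3]
      exact ih rest (by omega) (fun c hc => hall c (List.mem_cons_of_mem _ hc))

lemma strip_all_space (cs : List Char) (h : PySem.Chars.strip cs = []) :
    ∀ c ∈ cs, PySem.Chars.isspace c = true := by
  simp only [PySem.Chars.strip, PySem.Chars.lstrip, PySem.Chars.rstrip] at h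
  rw [List.reverse_eq_nil_iff, List.dropWhile_eq_nil_iff] at h
  intro c hc
  rcases List.mem_append.mp
      ((List.takeWhile_append_dropWhile (p := PySem.Chars.isspace) (l := cs)) ▸ hc) with h1 | h2
  · exact List.mem_takeWhile_imp h1
  · exact h c (List.mem_reverse.mpr h2)

-- ===== VERDICT (by name: the statement is the Claim_ definition above) =====
theorem is_comment_only_statement_spec : Claim_equal_is_comment_only_statement := by
  intro statement _
  unfold Spec_is_comment_only_statement is_comment_only_statement is_comment_only_statement_alt
  by_cases h : PySem.Str.strip statement = ""
  · rw [if_pos h]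
    have h' : PySem.Chars.strip statement.toList = [] := by
      have := congrArg String.toList h
      simpa [PySem.Str.toList_strip] using this
    exact (pvB_main_all_space _ _ le_rfl (strip_all_space _ h')).symm
  · rw [if_neg h]
    exact (pvMain_eq _ _ le_rfl).symm
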